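-- pv_equiv track=rewrite | github.com/21soland/CarminTrackTelemetry | backend/data_loading.py | parse_timestep_data
-- ===== SOURCE A (Python) =====
-- from typing import Dict, List, Optional
--
-- def get_header(line: str, headers: List[str]) -> Optional[str]:
--     """
--     Identify which header type a line belongs to.
--
--     Checks if a line starts with any of the known header types.
--
--     Args:
--         line: The line of text to check.
--         headers: List of known header type names.
--
--     Returns:
--         The matching header type name, or None if no match is found.
--     """
--     for header in headers:
--         if line.startswith(header):
--             return header
--     return None
--
-- def parse_timestep_data(time_step: List[str], headers_dict: Dict[str, List[str]]) -> Dict: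
--     """
--     Parse a single time step's data into a structured dictionary.
--
--     Processes all lines in a time step, grouping data by header type and
--     handling multiple entries of the same header type.
--
--     Args:
--         time_step: List of lines belonging to a single time step.
--         headers_dict: Dictionary mapping header types to their field names.
--
--     Returns:
--         Nested dictionary structure: {header_type: {entry_index: {field: value}}}
--         Example: {"Fix": {0: {"LatitudeDegrees": "40.123", ...}}, ...}
--     """
--     headers = list(headers_dict.keys())
--     time_step_dict = {}
--
--     for line in time_step:
--         header_type = get_header(line, headers)
--         if not header_type:
--             continue
--
--         split_line = line.rstrip().split(",")
--
--         # Check if there are multiple entries of the same header type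
--         n = 0
--         if header_type in time_step_dict:
--             n = len(time_step_dict[header_type].keys())
--         else:
--             time_step_dict[header_type] = {}
--
--         # Add the data for this entry
--         time_step_dict[header_type][n] = {}
--
--         header_type_keys = headers_dict[header_type]
--         for i in range(1, len(header_type_keys)):
--             # Note: i-1 because split_line[0] is the header type itself
--             time_step_dict[header_type][n][header_type_keys[i-1]] = split_line[i]
--
--     return time_step_dict
-- ===== SOURCE B (Python) =====
-- from typing import Dict, List, Optional
--
-- def get_header(line: str, headers: List[str]) -> Optional[str]:
--     for header in headers:
--         if line.startswith(header):
--             return header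
--     return None
--
-- def parse_timestep_data(time_step: List[str], headers_dict: Dict[str, List[str]]) -> Dict:
--     headers = list(headers_dict.keys())
--     # pass 1: tag each recognised line with its header type
--     tagged = []
--     for line in time_step:
--         h = get_header(line, headers)
--         if h:
--             tagged.append((h, line.rstrip().split(",")))
--     # pass 2: one result entry per distinct header, rows gathered by filtering
--     result = {}
--     for h in dict.fromkeys(h for h, _ in tagged):
--         keys = headers_dict[h]
--         rows = [row for h2, row in tagged if h2 == h]
--         result[h] = {n: {keys[i - 1]: row[i] for i in range(1, len(keys))}
--                      for n, row in enumerate(rows)}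
--     return result
-- ===== Notes on version B (the rewrite author's own statement) =====
-- stated objective: alternative
-- what changed: A builds the nested dict incrementally in one pass, mutating per-line with a count-based entry index; B first tags the recognised lines in one pass, then builds each header's entry dict declaratively by filtering the tagged rows per distinct header and enumerating them.
import Mathlib
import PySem

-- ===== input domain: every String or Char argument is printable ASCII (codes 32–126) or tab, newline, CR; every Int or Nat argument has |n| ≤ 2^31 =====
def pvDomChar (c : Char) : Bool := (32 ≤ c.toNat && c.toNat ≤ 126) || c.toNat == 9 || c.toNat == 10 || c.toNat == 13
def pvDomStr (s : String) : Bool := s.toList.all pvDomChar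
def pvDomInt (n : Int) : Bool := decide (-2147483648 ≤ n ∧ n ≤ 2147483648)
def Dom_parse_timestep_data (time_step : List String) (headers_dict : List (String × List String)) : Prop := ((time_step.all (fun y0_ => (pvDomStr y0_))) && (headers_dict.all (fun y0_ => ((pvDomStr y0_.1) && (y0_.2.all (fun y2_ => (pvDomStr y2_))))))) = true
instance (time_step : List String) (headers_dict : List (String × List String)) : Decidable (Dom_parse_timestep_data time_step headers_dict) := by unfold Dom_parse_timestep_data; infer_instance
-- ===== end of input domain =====

-- B replaces A's one-pass mutation of a nested dict (count-based entry index) by a tag-then-group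
-- two-pass decomposition (filter the tagged rows per distinct header, enumerate them); same values, same cost class.

-- shared module helper, as in both Python files
def get_header (line : String) : List String → Option String
  | [] => none
  | h :: rest => if PySem.Str.startswith line h then some h else get_header line rest

-- line.rstrip().split(",")  — split? is exact for the literal separator "," ≠ "", so getD [] is never used
def pvRow (line : String) : List String :=
  (PySem.Str.split? (PySem.Str.rstrip line) ",").getD []

-- ===== PORT A =====
def parse_timestep_data (time_step : List String) (headers_dict : List (String × List String)) :
    List (String × List (Int × List (String × String))) :=
  let headers := headers_dict.map (·.1)
  let d := time_step.foldl (fun d line =>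
    match get_header line headers with
    | none => d
    | some ht =>
      if ht == "" then d else
      let split_line := pvRow line
      let inner := (d.get? ht).getD PySem.Dict.empty
      let n : Int := (inner.size : Int)
      let keys := (PySem.Dict.mk headers_dict).getD ht []
      -- for i in range(1, len(keys)): fields[keys[i-1]] = split_line[i]; indexes are in range
      -- for keys (i-1 < len), and for split_line whenever Pre_ holds (otherwise Python raises IndexError)
      let fields := (PySem.List.pyRange 1 (keys.length : Int) 1).foldl
        (fun f i => f.insert ((PySem.List.pyGet? keys (i-1)).getD "")
                             ((PySem.List.pyGet? split_line i).getD "")) PySem.Dict.empty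
      d.insert ht (inner.insert n fields))
    (PySem.Dict.empty : PySem.Dict String (PySem.Dict Int (PySem.Dict String String)))
  d.items.map (fun p => (p.1, p.2.items.map (fun q => (q.1, q.2.items))))

-- ===== PORT B =====
def parse_timestep_data_alt (time_step : List String) (headers_dict : List (String × List String)) :
    List (String × List (Int × List (String × String))) :=
  let headers := headers_dict.map (·.1)
  let tagged := time_step.foldl (fun acc line =>
    match get_header line headers with
    | none => acc
    | some h => if h == "" then acc else acc ++ [(h, pvRow line)]) []
  let res := (PySem.List.dedup (tagged.map (·.1))).foldl (fun res h =>
    let keys := (PySem.Dict.mk headers_dict).getD h []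
    let rows := (tagged.filter (fun p => p.1 == h)).map (·.2)
    res.insert h ((PySem.Dict.ofList ((PySem.List.enumerate rows 0).map (fun q =>
      (q.1, (PySem.Dict.ofList ((PySem.List.pyRange 1 (keys.length : Int) 1).map (fun i =>
        ((PySem.List.pyGet? keys (i-1)).getD "", (PySem.List.pyGet? q.2 i).getD "")))).items)))).items))
    (PySem.Dict.empty : PySem.Dict String (List (Int × List (String × String))))
  res.items

-- ===== PRECONDITION & SPEC =====
-- Pre_ excludes exactly the inputs on which the Python raises IndexError: a recognised (non-empty-header)
-- line whose comma-split is shorter than the header's field-name list (when that list has ≥ 2 entries).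
def Pre_parse_timestep_data (time_step : List String) (headers_dict : List (String × List String)) : Prop :=
  (time_step.all (fun line =>
    match headers_dict.find? (fun p => PySem.Str.startswith line p.1) with
    | none => true
    | some p => p.1 == "" || decide (p.2.length ≤ 1 ∨ p.2.length ≤ (pvRow line).length))) = true
instance (time_step : List String) (headers_dict : List (String × List String)) : Decidable (Pre_parse_timestep_data time_step headers_dict) := by unfold Pre_parse_timestep_data; infer_instance

def pvWitness_parse_timestep_data : List String × (List (String × List String)) :=
  (["Fix,40.1,2.5", "Fix,41.0,3.5", "HR,77", "junk"], [("Fix", ["Fix", "Lat", "Lon"]), ("HR", ["HR", "Bpm"])])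

def Spec_parse_timestep_data (time_step : List String) (headers_dict : List (String × List String)) (out : List (String × List (Int × List (String × String)))) : Prop := out = parse_timestep_data_alt time_step headers_dict
instance (time_step : List String) (headers_dict : List (String × List String)) (out : List (String × List (Int × List (String × String)))) : Decidable (Spec_parse_timestep_data time_step headers_dict out) := by unfold Spec_parse_timestep_data; infer_instance

-- ===== CLAIM (what is proved, stated in full; the proofs are below) =====
def Claim_equal_parse_timestep_data : Prop := ∀ (time_step : List String) (headers_dict : List (String × List String)), Dom_parse_timestep_data time_step headers_dict → Pre_parse_timestep_data time_step headers_dict → Spec_parse_timestep_data time_step headers_dict (parse_timestep_data time_step headers_dict)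

-- ===== LEMMAS AND PROOFS =====

-- proof-side vocabulary
def pvKeysOf (headers_dict : List (String × List String)) (h : String) : List String :=
  (PySem.Dict.mk headers_dict).getD h []

def pvFieldsA (keys row : List String) : PySem.Dict String String :=
  (PySem.List.pyRange 1 (keys.length : Int) 1).foldl
    (fun f i => f.insert ((PySem.List.pyGet? keys (i-1)).getD "")
                         ((PySem.List.pyGet? row i).getD "")) PySem.Dict.empty

def pvStepA (headers_dict : List (String × List String))
    (d : PySem.Dict String (PySem.Dict Int (PySem.Dict String String)))
    (p : String × List String) : PySem.Dict String (PySem.Dict Int (PySem.Dict String String)) :=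
  let inner := (d.get? p.1).getD PySem.Dict.empty
  d.insert p.1 (inner.insert (inner.size : Int) (pvFieldsA (pvKeysOf headers_dict p.1) p.2))

def pvTagged (headers : List String) (ts : List String) : List (String × List String) :=
  (ts.filter (fun line => match get_header line headers with
    | none => false
    | some h => !(h == ""))).map (fun line => ((get_header line headers).getD "", pvRow line))

def pvRows (tagged : List (String × List String)) (h : String) : List (List String) :=
  (tagged.filter (fun p => p.1 == h)).map (·.2)

def pvInner (headers_dict : List (String × List String)) (h : String) (rows : List (List String)) :
    PySem.Dict Int (PySem.Dict String String) :=
  PySem.Dict.mk ((PySem.List.enumerate rows 0).map (fun q => (q.1, pvFieldsA (pvKeysOf headers_dict h) q.2)))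

def pvAbs (headers_dict : List (String × List String)) (tagged : List (String × List String)) :
    PySem.Dict String (PySem.Dict Int (PySem.Dict String String)) :=
  PySem.Dict.mk ((PySem.List.dedup (tagged.map (·.1))).map
    (fun h => (h, pvInner headers_dict h (pvRows tagged h))))

-- basic facts
lemma keys_pvAbs (hd : List (String × List String)) (l : List (String × List String)) :
    (pvAbs hd l).keys = PySem.List.dedup (l.map (·.1)) := by
  simp only [pvAbs, PySem.Dict.keys, List.map_map]
  exact List.map_id _

lemma get?_pvAbs_mem (hd : List (String × List String)) (l : List (String × List String))
    {h : String} (hm : h ∈ l.map (·.1)) :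
    (pvAbs hd l).get? h = some (pvInner hd h (pvRows l h)) := by
  apply PySem.Dict.get?_of_mem_items
  · exact List.mem_map_of_mem (by simpa [PySem.List.dedup, PySem.Set.mem_ofList] using hm)
  · rw [keys_pvAbs]
    simp only [PySem.List.dedup]
    exact PySem.Set.nodup_ofList (l.map (·.1))

lemma get?_pvAbs_not_mem (hd : List (String × List String)) (l : List (String × List String))
    {h : String} (hm : h ∉ l.map (·.1)) :
    (pvAbs hd l).get? h = none := by
  rw [PySem.Dict.get?_eq_none_iff_not_mem_keys, keys_pvAbs]
  simpa [PySem.List.dedup, PySem.Set.mem_ofList] using hm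

lemma size_pvInner (hd : List (String × List String)) (h : String) (rows : List (List String)) :
    (pvInner hd h rows).size = rows.length := by
  simp [pvInner, PySem.Dict.size, PySem.List.length_enumerate]

lemma contains_pvInner_length (hd : List (String × List String)) (h : String) (rows : List (List String)) :
    (pvInner hd h rows).contains ((rows.length : Int)) = false := by
  simp only [pvInner, PySem.Dict.contains_mk, List.any_eq_false]
  rintro ⟨n, f⟩ hp
  simp only [List.mem_map] at hp
  obtain ⟨q, hq, hqe⟩ := hp
  have h1 := PySem.List.pairwise_lt_enumerate rows 0
  have : q.1 ∈ (PySem.List.enumerate rows 0).map (·.1) := List.mem_map_of_mem hq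
  rw [PySem.List.map_fst_enumerate] at this
  rw [PySem.List.mem_pyRange_one] at this
  have : q.1 < (rows.length : Int) := by omega
  cases hqe
  simp only [beq_iff_eq]
  omega

lemma pvInner_snoc (hd : List (String × List String)) (h : String) (rows : List (List String))
    (row : List String) :
    pvInner hd h (rows ++ [row]) =
      (pvInner hd h rows).insert ((rows.length : Int)) (pvFieldsA (pvKeysOf hd h) row) := by
  apply PySem.Dict.ext
  rw [PySem.Dict.items_insert_of_not_contains _ _ (contains_pvInner_length hd h rows)]
  simp [pvInner, PySem.List.enumerate_append, PySem.List.enumerate]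

lemma pvRows_snoc_eq (l : List (String × List String)) (h : String) (row : List String) :
    pvRows (l ++ [(h, row)]) h = pvRows l h ++ [row] := by
  simp [pvRows, List.filter_append]

lemma pvRows_snoc_ne (l : List (String × List String)) {h h' : String} (row : List String)
    (hne : h' ≠ h) : pvRows (l ++ [(h, row)]) h' = pvRows l h' := by
  simp [pvRows, List.filter_append, beq_iff_eq, hne.symm]

lemma pvRows_nil_of_not_mem (l : List (String × List String)) {h : String}
    (hm : h ∉ l.map (·.1)) : pvRows l h = [] := by
  simp only [pvRows, List.map_eq_nil_iff, List.filter_eq_nil_iff]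
  intro p hp
  simp only [beq_iff_eq]
  intro he
  subst he
  exact hm (List.mem_map_of_mem hp)

lemma pvStepA_pvAbs (hd : List (String × List String)) (l : List (String × List String))
    (h : String) (row : List String) :
    pvStepA hd (pvAbs hd l) (h, row) = pvAbs hd (l ++ [(h, row)]) := by
  by_cases hmem : h ∈ l.map (·.1)
  · have hrows : (pvAbs hd l).get? h = some (pvInner hd h (pvRows l h)) := get?_pvAbs_mem hd l hmem
    have hcont : (pvAbs hd l).contains h = true := by
      rw [PySem.Dict.contains_eq_isSome_get?, hrows]; rfl
    have hded : PySem.List.dedup ((l ++ [(h, row)]).map (·.1)) = PySem.List.dedup (l.map (·.1)) := by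
      simp only [List.map_append, PySem.List.dedup, PySem.Set.ofList_append, List.map_cons,
        List.map_nil, PySem.Set.update_cons, PySem.Set.update_nil, PySem.Set.add]
      rw [if_pos]
      simp [PySem.Set.mem_ofList, hmem]
    simp only [pvStepA, hrows, Option.getD_some, size_pvInner]
    apply PySem.Dict.ext
    rw [PySem.Dict.items_insert_of_contains _ _ hcont]
    simp only [pvAbs, hded, List.map_map]
    apply List.map_congr_left
    intro h' hh'
    by_cases he : h' = h
    · subst he
      simp only [Function.comp_apply, beq_self_eq_true, if_pos]
      rw [pvRows_snoc_eq, pvInner_snoc]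
    · simp only [Function.comp_apply, beq_iff_eq, if_neg he]
      rw [pvRows_snoc_ne _ _ he]
  · have hrows : (pvAbs hd l).get? h = none := get?_pvAbs_not_mem hd l hmem
    have hcont : (pvAbs hd l).contains h = false := by
      rw [PySem.Dict.contains_eq_isSome_get?, hrows]; rfl
    have hded : PySem.List.dedup ((l ++ [(h, row)]).map (·.1)) = PySem.List.dedup (l.map (·.1)) ++ [h] := by
      simp only [List.map_append, PySem.List.dedup, PySem.Set.ofList_append, List.map_cons,
        List.map_nil, PySem.Set.update_cons, PySem.Set.update_nil, PySem.Set.add]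
      rw [if_neg]
      simp [PySem.Set.mem_ofList, hmem]
    simp only [pvStepA, hrows, Option.getD_none]
    apply PySem.Dict.ext
    rw [PySem.Dict.items_insert_of_not_contains _ _ hcont]
    simp only [pvAbs]
    rw [hded]
    simp only [List.map_append, List.map_cons, List.map_nil]
    congr 1
    · apply List.map_congr_left
      intro h' hh'
      have hne : h' ≠ h := by
        intro he; subst he
        exact hmem (by simpa [PySem.List.dedup, PySem.Set.mem_ofList] using hh')
      rw [pvRows_snoc_ne _ _ hne]
    · rw [pvRows_snoc_eq, pvRows_nil_of_not_mem l hmem]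
      apply congrArg (fun v => [(h, v)])
      apply PySem.Dict.ext
      rw [PySem.Dict.items_insert_of_not_contains _ _ (by simp)]
      simp [pvInner, PySem.Dict.size, PySem.List.enumerate, PySem.Dict.empty]

lemma foldA_eq_pvAbs (hd : List (String × List String)) (l : List (String × List String)) :
    l.foldl (pvStepA hd) PySem.Dict.empty = pvAbs hd l := by
  induction l using List.reverseRecOn with
  | nil => rfl
  | append_singleton l x ih =>
    obtain ⟨h, row⟩ := x
    rw [List.foldl_append, List.foldl_cons, List.foldl_nil, ih, pvStepA_pvAbs]

lemma pvTagged_cons_none {headers : List String} {line : String} (ts : List String)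
    (hh : get_header line headers = none) :
    pvTagged headers (line :: ts) = pvTagged headers ts := by
  simp [pvTagged, hh]

lemma pvTagged_cons_empty {headers : List String} {line : String} (ts : List String)
    (hh : get_header line headers = some "") :
    pvTagged headers (line :: ts) = pvTagged headers ts := by
  simp [pvTagged, hh]

lemma pvTagged_cons_some {headers : List String} {line : String} {h : String} (ts : List String)
    (hh : get_header line headers = some h) (hne : ¬ (h == "") = true) :
    pvTagged headers (line :: ts) = (h, pvRow line) :: pvTagged headers ts := by
  simp [pvTagged, hh, hne]

lemma foldA_lines (hd : List (String × List String)) (ts : List String)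
    (d : PySem.Dict String (PySem.Dict Int (PySem.Dict String String))) :
    ts.foldl (fun d line =>
      match get_header line (hd.map (·.1)) with
      | none => d
      | some ht =>
        if ht == "" then d else
        let split_line := pvRow line
        let inner := (d.get? ht).getD PySem.Dict.empty
        let n : Int := (inner.size : Int)
        let keys := (PySem.Dict.mk hd).getD ht []
        let fields := (PySem.List.pyRange 1 (keys.length : Int) 1).foldl
          (fun f i => f.insert ((PySem.List.pyGet? keys (i-1)).getD "")
                               ((PySem.List.pyGet? split_line i).getD "")) PySem.Dict.empty
        d.insert ht (inner.insert n fields)) d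
    = (pvTagged (hd.map (·.1)) ts).foldl (pvStepA hd) d := by
  induction ts generalizing d with
  | nil => rfl
  | cons line ts ih =>
    rw [List.foldl_cons]
    cases hh : get_header line (hd.map (·.1)) with
    | none =>
      simp only []
      rw [pvTagged_cons_none ts hh, ih]
    | some h =>
      by_cases hne : (h == "") = true
      · have he : h = "" := by simpa using hne
        subst he
        simp only [beq_self_eq_true, if_true]
        rw [pvTagged_cons_empty ts hh, ih]
      · simp only []
        rw [if_neg hne, pvTagged_cons_some ts hh hne, List.foldl_cons, ih]
        rfl

lemma foldB_lines (headers : List String) (ts : List String)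
    (acc : List (String × List String)) :
    ts.foldl (fun acc line =>
      match get_header line headers with
      | none => acc
      | some h => if h == "" then acc else acc ++ [(h, pvRow line)]) acc
    = acc ++ pvTagged headers ts := by
  induction ts generalizing acc with
  | nil => simp [pvTagged]
  | cons line ts ih =>
    rw [List.foldl_cons]
    cases hh : get_header line headers with
    | none =>
      simp only []
      rw [ih, pvTagged_cons_none ts hh]
    | some h =>
      by_cases hne : (h == "") = true
      · have he : h = "" := by simpa using hne
        subst he
        simp only [beq_self_eq_true, if_true]
        rw [ih, pvTagged_cons_empty ts hh]
      · simp only []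
        rw [if_neg hne, ih, pvTagged_cons_some ts hh hne]
        simp

lemma fieldsB_eq (keys row : List String) :
    PySem.Dict.ofList ((PySem.List.pyRange 1 (keys.length : Int) 1).map (fun i =>
      ((PySem.List.pyGet? keys (i-1)).getD "", (PySem.List.pyGet? row i).getD ""))) = pvFieldsA keys row := by
  simp only [PySem.Dict.ofList, PySem.Dict.update, List.foldl_map, pvFieldsA]

lemma ofListEnum_items (rows : List (List String)) (g : List String → List (String × String)) :
    (PySem.Dict.ofList ((PySem.List.enumerate rows 0).map (fun q => (q.1, g q.2)))).items
      = (PySem.List.enumerate rows 0).map (fun q => (q.1, g q.2)) := by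
  rw [PySem.Dict.ofList, PySem.Dict.update, List.foldl_map]
  rw [PySem.Dict.items_foldl_insert_fresh (PySem.List.enumerate rows 0)
    (fun q => q.1) (fun q => g q.2) PySem.Dict.empty (by simp) ?nd]
  · simp [PySem.Dict.empty]
  case nd =>
    have h1 := PySem.List.pairwise_lt_enumerate rows 0
    have h2 : ((PySem.List.enumerate rows 0).map (fun q => q.1)).Pairwise (· < ·) := by
      rw [List.pairwise_map]; exact h1
    exact h2.imp (fun hlt => ne_of_lt hlt)

lemma ports_agree (ts : List String) (hd : List (String × List String)) :
    parse_timestep_data ts hd = parse_timestep_data_alt ts hd := by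
  simp only [parse_timestep_data, parse_timestep_data_alt]
  rw [foldA_lines, foldA_eq_pvAbs, foldB_lines, List.nil_append]
  rw [PySem.Dict.items_foldl_insert_fresh
        (PySem.List.dedup ((pvTagged (hd.map (·.1)) ts).map (·.1)))
        (fun h => h) _ PySem.Dict.empty (by simp)
        (by rw [show (fun (h : String) => h) = id from rfl, List.map_id]; exact PySem.Set.nodup_ofList ((pvTagged (hd.map (·.1)) ts).map (·.1)))]
  simp only [PySem.Dict.empty, List.nil_append]
  unfold pvAbs
  simp only [List.map_map]
  apply List.map_congr_left
  intro h hh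
  simp only [Function.comp_apply]
  congr 1
  simp only [fieldsB_eq]
  rw [ofListEnum_items ((List.filter (fun p => p.1 == h) (pvTagged (List.map (fun x => x.1) hd) ts)).map (fun x => x.2))
        (fun r => (pvFieldsA ((PySem.Dict.mk hd : PySem.Dict String (List String)).getD h []) r).items)]
  simp only [pvInner, pvRows, pvKeysOf, List.map_map]
  rfl

-- ===== VERDICT (by name: the statement is the Claim_ definition above) =====
theorem parse_timestep_data_spec : Claim_equal_parse_timestep_data := by
  intro ts hd _ _
  unfold Spec_parse_timestep_data
  exact ports_agree ts hd
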